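-- pv_equiv track=rewrite | github.com/TristanDos/Grid2OP_RL_Agent_Implementations | v2_spaces.py | combinatorial_unions
-- ===== SOURCE A (Python) =====
-- import itertools
--
-- def combinatorial_unions(named_sets):
--     combinations = {}
--     keys = list(named_sets.keys())
--     sets = list(named_sets.values())
--
--     # Loop over all possible lengths of combinations (0 to N)
--     for r in range(1, len(sets) + 1):
--         # For each combination of size r, compute the union
--         for combination in itertools.combinations(enumerate(sets), r):
--             indices = [i for i, _ in combination]  # Get the indices of the sets in the combination
--             names = [keys[i] for i in indices]     # Get the corresponding names
--
--             # Generate a name for the combination (join with " U ")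
--             combination_name = " U ".join(names) if names else "empty"
--
--             # Compute the union of the sets in the combination
--             union_result = set().union(*(s for _, s in combination))
--
--             combinations[combination_name] = union_result
--
--     return combinations
-- ===== SOURCE B (Python) =====
-- def combinatorial_unions(named_sets):
--     n = len(named_sets)
--     # Suffix DP over the subset lattice: row[r] holds (name-parts, union) for every
--     # size-r combination of the suffix processed so far, in lexicographic index
--     # order.  Each subset's union is computed ONCE, from the union of the subset
--     # that drops its smallest index, instead of re-unioning all its members.
--     row = [[((), set())]] + [[] for _ in range(n)]
--     for k, s in reversed(list(named_sets.items())):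
--         row = [row[0]] + [[((k,) + tnames, s | tu) for tnames, tu in prev] + cur
--                           for prev, cur in zip(row, row[1:])]
--     result = {}
--     for level in row[1:]:
--         for names, u in level:
--             result[" U ".join(names)] = u
--     return result
-- ===== Notes on version B (the rewrite author's own statement) =====
-- stated objective: alternative
-- what changed: A recomputes every nonempty subset's union from scratch by unioning all its r members inside a combinations loop; B does a suffix DP over the subset lattice, producing each size-r level (in the same size-then-lexicographic order) by extending the previous level, so every subset costs exactly one union with the subset obtained by dropping its smallest index.
import Mathlib
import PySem

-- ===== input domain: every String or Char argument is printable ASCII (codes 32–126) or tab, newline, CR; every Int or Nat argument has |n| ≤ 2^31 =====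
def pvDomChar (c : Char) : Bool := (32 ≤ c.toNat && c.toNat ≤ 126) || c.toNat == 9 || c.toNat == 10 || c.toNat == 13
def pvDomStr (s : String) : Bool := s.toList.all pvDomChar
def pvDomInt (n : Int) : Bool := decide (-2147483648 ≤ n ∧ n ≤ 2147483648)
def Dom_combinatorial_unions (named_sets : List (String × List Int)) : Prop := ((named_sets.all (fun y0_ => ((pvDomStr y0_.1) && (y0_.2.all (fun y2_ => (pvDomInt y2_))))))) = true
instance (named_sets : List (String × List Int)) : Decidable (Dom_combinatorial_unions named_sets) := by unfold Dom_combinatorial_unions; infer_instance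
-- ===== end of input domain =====

-- B replaces A's per-subset re-union (A unions all r members of every subset from
-- scratch) with a suffix DP over the subset lattice: each subset's union is one
-- union away from the union of the subset dropping its smallest index.

-- ===== PORT A =====
def combinatorial_unions (named_sets : List (String × List Int)) : List (String × List Int) :=
  let keys := named_sets.map Prod.fst
  let sets := named_sets.map Prod.snd
  -- for r in range(1, len(sets) + 1): for combination in itertools.combinations(enumerate(sets), r): …
  ((PySem.List.pyRange 1 ((sets.length : Int) + 1)).foldl (fun d r =>
    (PySem.List.combinations (PySem.List.enumerate sets) r.toNat).foldl (fun d combination =>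
      let indices := combination.map (fun p => p.1)
      let names := indices.map (fun i => PySem.List.pyGetD keys i "")
      let combination_name := if names.isEmpty then "empty" else PySem.Str.join " U " names
      let union_result := combination.foldl (fun acc p => PySem.Set.union acc p.2) PySem.Set.empty
      PySem.Dict.insert d combination_name union_result) d) PySem.Dict.empty).items

-- ===== PORT B =====
def combinatorial_unions_alt (named_sets : List (String × List Int)) : List (String × List Int) :=
  let n := named_sets.length
  let row0 : List (List (List String × List Int)) := [([], PySem.Set.empty)] :: List.replicate n []
  -- for k, s in reversed(list(named_sets.items())): row = [row[0]] + [ext(prev) + cur for prev, cur in zip(row, row[1:])]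
  let row := named_sets.foldr (fun p row =>
      row.headD [] ::
        List.zipWith (fun prev cur =>
          prev.map (fun q => (p.1 :: q.1, PySem.Set.union p.2 q.2)) ++ cur) row row.tail) row0
  -- for level in row[1:]: for names, u in level: result[" U ".join(names)] = u
  (row.tail.foldl (fun d level =>
      level.foldl (fun d q => PySem.Dict.insert d (PySem.Str.join " U " q.1) q.2) d)
    PySem.Dict.empty).items

-- ===== PRECONDITION & SPEC =====
-- Pre_ excludes only value lists carrying duplicate elements: the Python values are
-- sets, which the type convention represents as lists of DISTINCT elements, so a
-- duplicate-carrying list does not represent any input the Python functions can receive.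
def Pre_combinatorial_unions (named_sets : List (String × List Int)) : Prop :=
  ∀ p ∈ named_sets, p.2.Nodup
instance (named_sets : List (String × List Int)) : Decidable (Pre_combinatorial_unions named_sets) := by unfold Pre_combinatorial_unions; infer_instance

def pvWitness_combinatorial_unions : (List (String × List Int)) := [("a", [1, 2]), ("b", [2, 3])]

def Spec_combinatorial_unions (named_sets : List (String × List Int)) (out : List (String × List Int)) : Prop := out = combinatorial_unions_alt named_sets
instance (named_sets : List (String × List Int)) (out : List (String × List Int)) : Decidable (Spec_combinatorial_unions named_sets out) := by unfold Spec_combinatorial_unions; infer_instance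

-- ===== CLAIM (what is proved, stated in full; the proofs are below) =====
def Claim_equal_combinatorial_unions : Prop := ∀ (named_sets : List (String × List Int)), Dom_combinatorial_unions named_sets → Pre_combinatorial_unions named_sets → Spec_combinatorial_unions named_sets (combinatorial_unions named_sets)

-- ===== LEMMAS AND PROOFS =====

-- the (name-parts, union) pair B stores for a combination c (union nested to the right)
def pvEnt (c : List (String × List Int)) : List String × List Int :=
  (c.map Prod.fst, c.foldr (fun p u => PySem.Set.union p.2 u) [])

-- all of B's row level r: the size-r combinations with their names and unions
def pvLevel (xs : List (String × List Int)) (r : Nat) : List (List String × List Int) :=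
  (PySem.List.combinations xs r).map pvEnt

theorem pv_add_union {α : Type} [BEq α] [LawfulBEq α] (a s : PySem.Set α) (x : α) :
    PySem.Set.union a (PySem.Set.add s x) = PySem.Set.add (PySem.Set.union a s) x := by
  by_cases hx : x ∈ s
  · rw [PySem.Set.add_of_mem hx, PySem.Set.add_of_mem ((PySem.Set.mem_union a s x).2 (Or.inr hx))]
  · rw [PySem.Set.add_of_not_mem hx]
    show List.foldl PySem.Set.add a (s ++ [x]) = _
    rw [List.foldl_append]
    rfl

theorem pv_union_assoc {α : Type} [BEq α] [LawfulBEq α] (a s t : PySem.Set α) :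
    PySem.Set.union (PySem.Set.union a s) t = PySem.Set.union a (PySem.Set.union s t) := by
  induction t generalizing s with
  | nil => rfl
  | cons x t ih =>
    show PySem.Set.union (PySem.Set.add (PySem.Set.union a s) x) t
        = PySem.Set.union a (PySem.Set.union (PySem.Set.add s x) t)
    rw [← pv_add_union, ih (PySem.Set.add s x)]

theorem pv_foldl_union {α β : Type} [BEq α] [LawfulBEq α] (f : β → PySem.Set α) (c : List β) (a : PySem.Set α) :
    c.foldl (fun acc p => PySem.Set.union acc (f p)) a
      = PySem.Set.union a (c.foldr (fun p u => PySem.Set.union (f p) u) []) := by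
  induction c generalizing a with
  | nil => rfl
  | cons p c ih =>
    rw [List.foldl_cons, ih, List.foldr_cons, ← pv_union_assoc]

theorem pv_nodup_foldr_union {α β : Type} [BEq α] [LawfulBEq α] (f : β → PySem.Set α) (c : List β)
    (h : ∀ p ∈ c, (f p).Nodup) :
    (c.foldr (fun p u => PySem.Set.union (f p) u) []).Nodup := by
  induction c with
  | nil => simp
  | cons p c ih =>
    exact PySem.Set.nodup_union _ _ (h p (List.mem_cons_self))

-- A's left-to-right union of the members equals B's right-nested union
theorem pv_union_eq (c : List (String × List Int)) (h : ∀ p ∈ c, p.2.Nodup) :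
    c.foldl (fun acc p => PySem.Set.union acc p.2) []
      = c.foldr (fun p u => PySem.Set.union p.2 u) [] := by
  have h1 : c.foldl (fun acc p => PySem.Set.union acc p.2) []
      = PySem.Set.union [] (c.foldr (fun p u => PySem.Set.union p.2 u) []) :=
    pv_foldl_union (fun p => p.2) c []
  rw [h1]
  show PySem.Set.ofList _ = _
  exact PySem.Set.ofList_eq_self_of_nodup _ (pv_nodup_foldr_union (fun p => p.2) c h)

theorem pv_enumerate_map {α β : Type} (f : α → β) (xs : List α) (s : Int) :
    PySem.List.enumerate (xs.map f) s = (PySem.List.enumerate xs s).map (fun p => (p.1, f p.2)) := by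
  induction xs generalizing s with
  | nil => simp [PySem.List.enumerate_nil]
  | cons x xs ih => simp [PySem.List.enumerate_cons, ih]

-- A's inner loop over size-(r+1) combinations is a fold over pvLevel (r+1)
theorem pv_A_inner (xs : List (String × List Int)) (hn : ∀ p ∈ xs, p.2.Nodup) (r : Nat)
    (d : PySem.Dict String (List Int)) :
    (PySem.List.combinations (PySem.List.enumerate (xs.map Prod.snd)) (r + 1)).foldl
        (fun d combination =>
          PySem.Dict.insert d
            (if ((combination.map (fun p => p.1)).map (fun i => PySem.List.pyGetD (xs.map Prod.fst) i "")).isEmpty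
              then "empty"
              else PySem.Str.join " U " ((combination.map (fun p => p.1)).map (fun i => PySem.List.pyGetD (xs.map Prod.fst) i "")))
            (combination.foldl (fun acc p => PySem.Set.union acc p.2) PySem.Set.empty)) d
      = (pvLevel xs (r + 1)).foldl
          (fun d q => PySem.Dict.insert d (PySem.Str.join " U " q.1) q.2) d := by
  rw [pv_enumerate_map, PySem.List.combinations_map, List.foldl_map]
  have hsnd : (PySem.List.combinations (PySem.List.enumerate xs) (r + 1)).map (List.map Prod.snd)
      = PySem.List.combinations xs (r + 1) := by
    rw [← PySem.List.combinations_map, PySem.List.map_snd_enumerate]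
  rw [pvLevel, ← hsnd, List.map_map, List.foldl_map]
  apply PySem.List.foldl_congr_mem
  intro acc e he
  have hsub : e.Sublist (PySem.List.enumerate xs) := PySem.List.sublist_of_mem_combinations he
  have hlen : e.length = r + 1 := PySem.List.length_of_mem_combinations he
  have hq : ∀ q ∈ e, PySem.List.pyGetD (xs.map Prod.fst) q.1 "" = q.2.1 ∧ q.2 ∈ xs := by
    intro q hq
    have hmem : q ∈ PySem.List.enumerate xs 0 := List.Sublist.mem hq hsub
    rw [PySem.List.mem_enumerate_iff] at hmem
    obtain ⟨k, hk, rfl⟩ := hmem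
    constructor
    · show PySem.List.pyGetD (xs.map Prod.fst) ((0 : Int) + (k : Int)) "" = _
      rw [zero_add, PySem.List.pyGetD_natCast, List.getD_eq_getElem _ _ (by simpa using hk)]
      simp
    · simp
  have hnames : ((e.map (fun p => (p.1, p.2.2))).map (fun p => p.1)).map (fun i => PySem.List.pyGetD (xs.map Prod.fst) i "")
      = (e.map Prod.snd).map Prod.fst := by
    rw [List.map_map, List.map_map, List.map_map]
    exact List.map_congr_left (fun q hmem => (hq q hmem).1)
  rw [hnames]
  have hne : ((e.map Prod.snd).map Prod.fst).isEmpty = false := by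
    rw [List.isEmpty_eq_false_iff]
    intro h
    have := congrArg List.length h
    simp [hlen] at this
  rw [hne]
  simp only [Bool.false_eq_true, if_false]
  have hval : List.foldl (fun (acc : PySem.Set Int) (p : Int × List Int) => PySem.Set.union acc p.2) PySem.Set.empty (e.map (fun p => (p.1, p.2.2)))
      = (pvEnt (e.map Prod.snd)).2 := by
    rw [List.foldl_map]
    have hnd : ∀ p ∈ e.map Prod.snd, p.2.Nodup := by
      intro p hp
      rw [List.mem_map] at hp
      obtain ⟨q, hqe, rfl⟩ := hp
      exact hn _ ((hq q hqe).2)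
    have h2 : (pvEnt (e.map Prod.snd)).2
        = (e.map Prod.snd).foldr (fun p u => PySem.Set.union p.2 u) [] := rfl
    rw [h2, ← pv_union_eq _ hnd, List.foldl_map]
    exact PySem.List.foldl_congr_mem e _ _ PySem.Set.empty (fun acc x _ => rfl)
  rw [hval]
  rfl

theorem pv_pyRange_one (n : Nat) :
    PySem.List.pyRange 1 ((n : Int) + 1) = (List.range n).map (fun k => (((k + 1 : Nat)) : Int)) := by
  induction n with
  | zero => rfl
  | succ n ih =>
    have h1 : ((n + 1 : Nat) : Int) + 1 = ((n : Int) + 1) + 1 := by push_cast; ring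
    rw [h1, PySem.List.pyRange_one_succ_right (by omega), ih, List.range_succ, List.map_append]
    simp

-- B's row after the fold: level r holds the size-r combinations
theorem pv_B_row (xs : List (String × List Int)) (N : Nat) :
    xs.foldr (fun p row =>
        row.headD [] ::
          List.zipWith (fun prev cur =>
            prev.map (fun q => (p.1 :: q.1, PySem.Set.union p.2 q.2)) ++ cur) row row.tail)
      (([([], PySem.Set.empty)] : List (List String × List Int)) :: List.replicate N [])
      = (List.range (N + 1)).map (fun r => pvLevel xs r) := by
  induction xs with
  | nil =>
    rw [List.foldr_nil, List.range_succ_eq_map, List.map_cons]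
    have h0 : pvLevel [] 0 = [([], PySem.Set.empty)] := rfl
    rw [h0]
    congr 1
    rw [List.map_map]
    have : ∀ r ∈ List.range N, (pvLevel [] ∘ Nat.succ) r = ([] : List (List String × List Int)) := by
      intro r _
      simp [pvLevel, PySem.List.combinations_nil_succ]
    rw [List.map_congr_left this]
    simp [List.map_const']
  | cons p xs ih =>
    rw [List.foldr_cons, ih]
    apply List.ext_getElem
    · simp
    · intro i hi hi'
      cases i with
      | zero =>
        rw [List.getElem_cons_zero]
        simp [List.range_succ_eq_map, pvLevel, PySem.List.combinations_zero]
      | succ i =>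
        rw [List.getElem_cons_succ, List.getElem_zipWith, List.getElem_tail]
        simp only [List.getElem_map, List.getElem_range]
        show (pvLevel xs i).map _ ++ pvLevel xs (i+1) = pvLevel (p :: xs) (i+1)
        rw [show pvLevel (p :: xs) (i+1)
              = (PySem.List.combinations xs i).map (fun c => pvEnt (p :: c)) ++ pvLevel xs (i+1) by
            rw [pvLevel, PySem.List.combinations_cons_succ, List.map_append, List.map_map]; rfl]
        congr 1
        rw [pvLevel, List.map_map]
        rfl

-- ===== VERDICT (by name: the statement is the Claim_ definition above) =====
theorem combinatorial_unions_spec : Claim_equal_combinatorial_unions := by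
  intro xs _ hpre
  unfold Spec_combinatorial_unions combinatorial_unions combinatorial_unions_alt
  simp only
  rw [pv_B_row xs xs.length, List.range_succ_eq_map, List.map_cons, List.tail_cons, List.map_map,
    List.length_map, pv_pyRange_one, List.foldl_map, List.foldl_map]
  congr 1
  apply PySem.List.foldl_congr_mem
  intro acc k _
  have ht : (((k + 1 : Nat) : Int)).toNat = k + 1 := by simp
  rw [ht]
  exact (pv_A_inner xs hpre k acc).trans rfl
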